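-- pv_equiv track=rewrite | github.com/JLee21/tech-prep | code-problems/sort/two-sum-less-than-k-flights.py | findRoutePairs
-- ===== SOURCE A (Python) =====
-- import heapq
--
-- def findRoutePairs(maxTravelDist, forwards, returns):
--
--     routes = []
--     bestRoutes = []
--     for forward in forwards:
--         for back in returns:
--             distance = forward[1] + back[1]
--             if distance <= maxTravelDist:
--                 heapq.heappush(routes, (-distance, [forward[0], back[0]]))
--
--     if len(routes) == 0:
--         return []
--
--     bestRoute = heapq.heappop(routes)
--     bestRoutes.append(bestRoute[1])
--     while len(routes) > 0:
--         nextBestRoute = heapq.heappop(routes)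
--         # if the next best route distance is less than the best route distance then break
--         # note that both values are negative
--         if nextBestRoute[0] > bestRoute[0]:
--             break
--         bestRoutes.append(nextBestRoute[1])
--
--     return bestRoutes
-- ===== SOURCE B (Python) =====
-- def findRoutePairs(maxTravelDist, forwards, returns):
--     best = None
--     for f in forwards:
--         for b in returns:
--             d = f[1] + b[1]
--             if d <= maxTravelDist and (best is None or d > best):
--                 best = d
--     if best is None:
--         return []
--     return sorted([f[0], b[0]] for f in forwards for b in returns
--                   if f[1] + b[1] == best)
-- ===== Notes on version B (the rewrite author's own statement) =====
-- stated objective: faster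
-- what changed: A pushes every qualifying (distance, ids) pair into a heap and pops until the key drops; B finds the maximum qualifying distance with a plain running-max scan and then sorts only the pairs that achieve it, materialising no heap.
import Mathlib
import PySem

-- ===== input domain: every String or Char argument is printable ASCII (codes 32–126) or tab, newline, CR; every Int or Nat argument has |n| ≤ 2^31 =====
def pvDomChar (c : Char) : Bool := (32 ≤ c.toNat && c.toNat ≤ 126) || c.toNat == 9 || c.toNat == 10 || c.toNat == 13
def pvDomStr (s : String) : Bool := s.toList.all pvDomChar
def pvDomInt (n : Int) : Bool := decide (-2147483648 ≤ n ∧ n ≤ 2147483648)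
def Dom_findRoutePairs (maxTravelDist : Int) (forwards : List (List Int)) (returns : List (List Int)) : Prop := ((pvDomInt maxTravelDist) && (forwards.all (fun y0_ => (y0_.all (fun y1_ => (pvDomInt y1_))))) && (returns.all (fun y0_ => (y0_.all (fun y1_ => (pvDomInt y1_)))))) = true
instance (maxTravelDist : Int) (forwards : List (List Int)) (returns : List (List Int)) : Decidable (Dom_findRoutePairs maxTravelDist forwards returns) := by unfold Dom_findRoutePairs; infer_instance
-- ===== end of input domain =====

-- B replaces A's heap of ALL qualifying pairs by a direct running-maximum scan plus a sort of
-- only the tied pairs (objective: faster; no heap of n*m entries is built or popped).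

-- ===== PORT A =====
-- l[i]: Pre_ guarantees the index is in range wherever A evaluates it; the .getD 0 default is never reached inside Pre_.
def fget (l : List Int) (i : Int) : Int := (PySem.List.pyGet? l i).getD 0

-- Python tuple (-distance, [fid, bid]) compares lexicographically: Int first, then the id list.
def hkey (x : Int × List Int) : Int ×ₗ (List Int) := toLex x

-- heapq.heappush, value-exactly: a heap's pop sequence is its multiset in sorted tuple order,
-- so the heap state is kept as that ordered list (ties are identical tuples, hence unambiguous).
def pushStep (maxTravelDist : Int) (forward back : List Int) (r : List (Int × List Int)) : List (Int × List Int) :=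
  let distance := fget forward 1 + fget back 1
  if distance ≤ maxTravelDist then
    PySem.List.insertBy (fun a b => decide (hkey a < hkey b)) (-distance, [fget forward 0, fget back 0]) r
  else r

-- the 'while len(routes) > 0' pop loop after the first pop
def popLoop (best : Int) : List (Int × List Int) → List (List Int)
  | [] => []
  | x :: xs => if best < x.1 then [] else x.2 :: popLoop best xs

def findRoutePairs (maxTravelDist : Int) (forwards : List (List Int)) (returns : List (List Int)) : List (List Int) :=
  let routes : List (Int × List Int) :=
    forwards.foldl (fun r forward => returns.foldl (fun r back => pushStep maxTravelDist forward back r) r) []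
  match routes with
  | [] => []
  | bestRoute :: rest => bestRoute.2 :: popLoop bestRoute.1 rest

-- ===== PORT B =====
-- 'if d <= maxTravelDist and (best is None or d > best): best = d'
def bstep (maxTravelDist : Int) (best : Option Int) (d : Int) : Option Int :=
  if decide (d ≤ maxTravelDist) && (match best with | none => true | some m => decide (m < d)) then some d else best

def findRoutePairs_alt (maxTravelDist : Int) (forwards : List (List Int)) (returns : List (List Int)) : List (List Int) :=
  let best : Option Int :=
    forwards.foldl (fun acc f => returns.foldl (fun acc b => bstep maxTravelDist acc (fget f 1 + fget b 1)) acc) none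
  match best with
  | none => []
  | some m =>
      -- sorted(...) on Python lists of ints: lexicographic order (= Lean's order on List Int;
      -- the DecidableLT instance is pinned to the LinearOrder's, same relation)
      @PySem.List.sorted _ _ _ LinearOrder.toDecidableLT
        (forwards.flatMap (fun f => returns.filterMap (fun b =>
          if fget f 1 + fget b 1 = m then some [fget f 0, fget b 0] else none)))
        (fun x => x) false

-- ===== PRECONDITION & SPEC =====
-- Pre_ excludes exactly the inputs where A raises IndexError: some paired list shorter than 2
-- (an element list is only ever indexed when both input lists are nonempty).
def Pre_findRoutePairs (maxTravelDist : Int) (forwards : List (List Int)) (returns : List (List Int)) : Prop :=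
  forwards = [] ∨ returns = [] ∨ ((∀ l ∈ forwards, 2 ≤ l.length) ∧ (∀ l ∈ returns, 2 ≤ l.length))
instance (maxTravelDist : Int) (forwards : List (List Int)) (returns : List (List Int)) : Decidable (Pre_findRoutePairs maxTravelDist forwards returns) := by unfold Pre_findRoutePairs; infer_instance

def pvWitness_findRoutePairs : Int × List (List Int) × List (List Int) := (10, [[1, 2], [2, 3]], [[4, 5]])

def Spec_findRoutePairs (maxTravelDist : Int) (forwards : List (List Int)) (returns : List (List Int)) (out : List (List Int)) : Prop := out = findRoutePairs_alt maxTravelDist forwards returns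
instance (maxTravelDist : Int) (forwards : List (List Int)) (returns : List (List Int)) (out : List (List Int)) : Decidable (Spec_findRoutePairs maxTravelDist forwards returns out) := by unfold Spec_findRoutePairs; infer_instance

-- ===== CLAIM (what is proved, stated in full; the proofs are below) =====
def Claim_equal_findRoutePairs : Prop := ∀ (maxTravelDist : Int) (forwards : List (List Int)) (returns : List (List Int)), Dom_findRoutePairs maxTravelDist forwards returns → Pre_findRoutePairs maxTravelDist forwards returns → Spec_findRoutePairs maxTravelDist forwards returns (findRoutePairs maxTravelDist forwards returns)

-- ===== LEMMAS AND PROOFS =====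

-- all (forward, back) pairs in loop order
def AP (fs rs : List (List Int)) : List (List Int × List Int) := fs.flatMap (fun f => rs.map (fun b => (f, b)))
def dOf (p : List Int × List Int) : Int := fget p.1 1 + fget p.2 1
def pairOf (p : List Int × List Int) : List Int := [fget p.1 0, fget p.2 0]
def encOf (p : List Int × List Int) : Int × List Int := (-(dOf p), pairOf p)
def updMax (a : Option Int) (d : Int) : Option Int := match a with | none => some d | some m => some (max m d)

theorem nested_foldl {σ : Type} (t : σ → (List Int × List Int) → σ) (fs rs : List (List Int)) (r0 : σ) :
    fs.foldl (fun r f => rs.foldl (fun r b => t r (f, b)) r) r0 = (AP fs rs).foldl t r0 := by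
  induction fs generalizing r0 with
  | nil => rfl
  | cons f fs ih => simp [AP, List.foldl_append, List.foldl_map, ih, List.flatMap_cons]


theorem nested_filterMap (g : (List Int × List Int) → Option (List Int)) (fs rs : List (List Int)) :
    fs.flatMap (fun f => rs.filterMap (fun b => g (f, b))) = (AP fs rs).filterMap g := by
  induction fs with
  | nil => rfl
  | cons f fs ih => simp [AP, List.filterMap_append, List.filterMap_map, ih, List.flatMap_cons]


theorem filterMap_ite_eq_map_filter (p : (List Int × List Int) → Prop) [DecidablePred p]
    (f : (List Int × List Int) → List Int) (l : List (List Int × List Int)) :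
    l.filterMap (fun x => if p x then some (f x) else none) = (l.filter (fun x => decide (p x))).map f := by
  induction l with
  | nil => rfl
  | cons x l ih =>
    by_cases h : p x <;> simp [h, ih]


theorem routes_closed (k : Int) (fs rs : List (List Int)) :
    fs.foldl (fun r forward => rs.foldl (fun r back => pushStep k forward back r) r) []
      = PySem.List.sorted (((AP fs rs).filter (fun p => decide (dOf p ≤ k))).map encOf) hkey := by
  refine Eq.trans (nested_foldl (fun r p => pushStep k p.1 p.2 r) fs rs []) ?_
  have h2 : (AP fs rs).foldl (fun r p => pushStep k p.1 p.2 r) []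
      = (AP fs rs).foldl (fun r p => if dOf p ≤ k then
          PySem.List.insertBy (fun a b => decide (hkey a < hkey b)) (encOf p) r else r) [] := rfl
  rw [h2, PySem.List.foldl_ite_eq_foldl_filter (p := fun p => dOf p ≤ k)
        (f := fun r p => PySem.List.insertBy (fun a b => decide (hkey a < hkey b)) (encOf p) r),
      ← List.foldl_map (f := encOf)
        (g := fun r x => PySem.List.insertBy (fun a b => decide (hkey a < hkey b)) x r)]
  exact (PySem.List.sorted_eq_foldl_insertBy _ hkey).symm


theorem bstep_eq_upd (k : Int) (acc : Option Int) (d : Int) :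
    bstep k acc d = if d ≤ k then updMax acc d else acc := by
  cases acc with
  | none => simp [bstep, updMax]
  | some m =>
    by_cases h : d ≤ k
    · by_cases h2 : m < d <;> simp [bstep, updMax, h, h2] <;> omega
    · simp [bstep, h]


theorem foldl_updMax_some (zs : List Int) (m0 : Int) :
    zs.foldl updMax (some m0) = some (zs.foldl max m0) := by
  induction zs generalizing m0 with
  | nil => rfl
  | cons z zs ih => simpa [updMax] using ih (max m0 z)


theorem best_closed (k : Int) (fs rs : List (List Int)) :
    fs.foldl (fun acc f => rs.foldl (fun acc b => bstep k acc (fget f 1 + fget b 1)) acc) none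
      = match ((AP fs rs).filter (fun p => decide (dOf p ≤ k))).map dOf with
        | [] => none
        | z :: zt => some (zt.foldl max z) := by
  refine Eq.trans (nested_foldl (fun acc p => bstep k acc (dOf p)) fs rs none) ?_
  have h2 : (AP fs rs).foldl (fun acc p => bstep k acc (dOf p)) none
      = (AP fs rs).foldl (fun acc p => if dOf p ≤ k then updMax acc (dOf p) else acc) none :=
    PySem.List.foldl_congr_mem _ _ _ none (fun acc p _ => bstep_eq_upd k acc (dOf p))
  rw [h2, PySem.List.foldl_ite_eq_foldl_filter (p := fun p => dOf p ≤ k)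
        (f := fun acc p => updMax acc (dOf p)),
      ← List.foldl_map (f := dOf) (g := updMax)]
  generalize (((AP fs rs).filter fun p => decide (dOf p ≤ k)).map dOf) = zs
  cases zs with
  | nil => rfl
  | cons z zt => simpa [updMax] using foldl_updMax_some zt z


theorem hkey_le_fst {a b : Int × List Int} (h : hkey a ≤ hkey b) : a.1 ≤ b.1 := by
  rcases Prod.Lex.le_iff.mp h with h' | ⟨h', _⟩ <;> simp [hkey] at h' <;> omega

theorem hkey_le_snd {a b : Int × List Int} (h : hkey a ≤ hkey b) (he : a.1 = b.1) : a.2 ≤ b.2 := by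
  rcases Prod.Lex.le_iff.mp h with h' | ⟨_, h'⟩
  · simp [hkey] at h'; omega
  · simpa [hkey] using h'

theorem popLoop_eq (v : Int) (t : List (Int × List Int))
    (h1 : ∀ x ∈ t, v ≤ x.1) (h2 : t.Pairwise (fun a b => hkey a ≤ hkey b)) :
    popLoop v t = (t.filter (fun x => decide (x.1 = v))).map (·.2) := by
  induction t with
  | nil => rfl
  | cons x xs ih =>
    have hx : v ≤ x.1 := h1 x (List.mem_cons_self ..)
    have hxs : ∀ y ∈ xs, hkey x ≤ hkey y := (List.pairwise_cons.mp h2).1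
    by_cases hgt : v < x.1
    · have hall : (x :: xs).filter (fun y => decide (y.1 = v)) = [] := by
        rw [List.filter_eq_nil_iff]
        intro y hy
        rcases List.mem_cons.mp hy with rfl | hy'
        · simp; omega
        · have := hkey_le_fst (hxs y hy')
          simp; omega
      simp [popLoop, hgt, hall]
    · have hxv : x.1 = v := by omega
      have h1' : ∀ y ∈ xs, v ≤ y.1 := fun y hy => hxv ▸ hkey_le_fst (hxs y hy)
      simp [popLoop, hxv, ih h1' (List.pairwise_cons.mp h2).2]


-- ===== VERDICT (by name: the statement is the Claim_ definition above) =====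
theorem findRoutePairs_spec : Claim_equal_findRoutePairs := by
  intro k fs rs _ _
  show findRoutePairs k fs rs = findRoutePairs_alt k fs rs
  simp only [findRoutePairs, findRoutePairs_alt]
  rw [routes_closed, best_closed]
  cases hzs : (AP fs rs).filter (fun p => decide (dOf p ≤ k)) with
  | nil => rfl
  | cons z zt =>
    -- the maximum qualifying distance
    set M : Int := (zt.map dOf).foldl max (dOf z) with hM
    have hub : ∀ p ∈ z :: zt, dOf p ≤ M := by
      intro p hp
      rcases List.mem_cons.mp hp with rfl | hp'
      · exact (PySem.List.le_foldl_max (zt.map dOf) (dOf p)).1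
      · exact (PySem.List.le_foldl_max (zt.map dOf) (dOf z)).2 _ (List.mem_map_of_mem hp')
    have hex : ∃ p ∈ z :: zt, dOf p = M := by
      rcases PySem.List.foldl_max_mem (zt.map dOf) (dOf z) with h | h
      · exact ⟨z, List.mem_cons_self .., by rw [hM]; exact h.symm⟩
      · rcases List.mem_map.mp h with ⟨p, hp, hpd⟩
        exact ⟨p, List.mem_cons_of_mem _ hp, by rw [hM]; exact hpd⟩
    obtain ⟨ph, hph, hphd⟩ := hex
    have hMk : M ≤ k := by
      have : ph ∈ (AP fs rs).filter (fun p => decide (dOf p ≤ k)) := hzs ▸ hph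
      have := (List.mem_filter.mp this).2
      simp at this; omega
    -- the heap contents, sorted
    simp only [List.map_cons]
    cases hr : PySem.List.sorted (encOf z :: zt.map encOf) hkey with
    | nil => exact absurd ((PySem.List.sorted_eq_nil_iff _ _ _).mp hr) (by simp)
    | cons h t =>
      have hmemQ : ∀ p ∈ z :: zt, encOf p ∈ encOf z :: zt.map encOf := by
        intro p hp
        rcases List.mem_cons.mp hp with rfl | hp'
        · exact List.mem_cons_self ..
        · exact List.mem_cons_of_mem _ (List.mem_map_of_mem hp')
      have hhQ : h ∈ encOf z :: zt.map encOf := by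
        have : h ∈ PySem.List.sorted (encOf z :: zt.map encOf) hkey := by
          rw [hr]; exact List.mem_cons_self ..
        exact (PySem.List.mem_sorted _ _ _ _).mp this
      have hobt : ∃ p, p ∈ z :: zt ∧ h = encOf p := by
        rcases List.mem_cons.mp hhQ with h' | h'
        · exact ⟨z, List.mem_cons_self .., h'⟩
        · rcases List.mem_map.mp h' with ⟨p, hp, hpe⟩
          exact ⟨p, List.mem_cons_of_mem _ hp, hpe.symm⟩
      obtain ⟨p0, hp0, hp0e⟩ := hobt
      have hfst : h.1 = -M := by
        have hle : hkey h ≤ hkey (encOf ph) :=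
          PySem.List.key_head_sorted_le _ hkey hr _ (hmemQ ph hph)
        have h1 : h.1 ≤ -(dOf ph) := by
          have := hkey_le_fst hle
          simpa [encOf] using this
        have h2 : h.1 = -(dOf p0) := by rw [hp0e]; simp [encOf]
        have h3 := hub p0 hp0
        omega
      have hpw : (h :: t).Pairwise (fun a b => hkey a ≤ hkey b) := by
        rw [← hr]; exact PySem.List.sorted_pairwise _ hkey
      have hhd := (List.pairwise_cons.mp hpw).1
      have htl := (List.pairwise_cons.mp hpw).2
      -- A's pop loop = the leading equal-distance group
      change h.2 :: popLoop h.1 t = @PySem.List.sorted _ _ _ LinearOrder.toDecidableLT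
        (fs.flatMap (fun f => rs.filterMap (fun b =>
          if fget f 1 + fget b 1 = M then some [fget f 0, fget b 0] else none))) (fun x => x) false
      rw [popLoop_eq h.1 t (fun x hx => hkey_le_fst (hhd x hx)) htl]
      have hAfilter : h.2 :: (t.filter (fun x => decide (x.1 = h.1))).map (·.2)
          = ((h :: t).filter (fun x => decide (x.1 = -M))).map (·.2) := by
        rw [← hfst]; simp
      rw [hAfilter]
      -- B's comprehension
      have eB : fs.flatMap (fun f => rs.filterMap (fun b =>
            if fget f 1 + fget b 1 = M then some [fget f 0, fget b 0] else none))
          = (AP fs rs).filterMap (fun p => if dOf p = M then some (pairOf p) else none) :=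
        nested_filterMap (fun p => if dOf p = M then some (pairOf p) else none) fs rs
      rw [eB, filterMap_ite_eq_map_filter (p := fun p => dOf p = M) pairOf]
      -- both sides are sorted rearrangements of the same multiset of id pairs
      have hMfil : (AP fs rs).filter (fun p => decide (dOf p = M))
          = (z :: zt).filter (fun p => decide (dOf p = M)) := by
        rw [← hzs, List.filter_filter]
        refine List.filter_congr ?_
        intro p _
        by_cases hd : dOf p = M <;> simp [hd] <;> omega
      have hperm : ((h :: t).filter (fun x => decide (x.1 = -M))).map (·.2)
          |>.Perm (((z :: zt).filter (fun p => decide (dOf p = M))).map pairOf) := by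
        have p1 : (h :: t).Perm (encOf z :: zt.map encOf) := hr ▸ PySem.List.sorted_perm _ hkey false
        have p2 := (p1.filter (fun x => decide (x.1 = -M))).map (·.2)
        refine p2.trans ?_
        have : (encOf z :: zt.map encOf) = (z :: zt).map encOf := by simp
        rw [this, List.filter_map]
        have : (z :: zt).filter ((fun x => decide (x.1 = -M)) ∘ encOf)
            = (z :: zt).filter (fun p => decide (dOf p = M)) := by
          refine List.filter_congr ?_
          intro p _
          simp [encOf]
        rw [this, List.map_map]
        exact List.Perm.refl _
      have hpwA : (((h :: t).filter (fun x => decide (x.1 = -M))).map (·.2)).Pairwise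
          (fun a b => a ≤ b) := by
        rw [List.pairwise_map]
        refine List.Pairwise.imp_of_mem ?_ (hpw.filter _)
        intro a b ha hb hab
        have ha1 := (List.mem_filter.mp ha).2
        have hb1 := (List.mem_filter.mp hb).2
        simp at ha1 hb1
        exact hkey_le_snd hab (by omega)
      have hpwB := PySem.List.sorted_pairwise
        (((AP fs rs).filter (fun p => decide (dOf p = M))).map pairOf) (fun x => x)
      refine PySem.List.eq_of_perm_of_pairwise_le_of_injective (fun x : List Int => x)
        (fun a b hab => hab) ?_ hpwA hpwB
      refine hperm.trans ?_
      rw [hMfil]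
      exact (@PySem.List.sorted_perm _ _ _ LinearOrder.toDecidableLT _ _ false).symm
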